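-- pv_equiv track=rewrite | github.com/utkarsh-naman/utnampython | utnampython_installer/x64/files/Lib/utnalgo/Graph/traversal.py | dfs
-- ===== SOURCE A (Python) =====
-- def dfs(graph, start):
--     visited = set()
--     stack = [start]
--     traversal_order = []
--
--     while stack:
--         node = stack.pop()
--         if node not in visited:
--             visited.add(node)
--             traversal_order.append(node)
--             stack.extend(reversed(graph.get(node, [])))  # Reverse to maintain correct order
--
--     return traversal_order
-- ===== SOURCE B (Python) =====
-- def dfs(graph, start):
--     visited = set()
--     traversal_order = []
--
--     def visit(node):
--         if node not in visited:
--             visited.add(node)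
--             traversal_order.append(node)
--             for neighbor in graph.get(node, []):
--                 visit(neighbor)
--
--     visit(start)
--     return traversal_order
-- ===== Notes on version B (the rewrite author's own statement) =====
-- stated objective: idiomatic
-- what changed: Replaces the explicit stack loop (pop + push reversed neighbors) with a recursive visit helper that marks a node and then recurses over its neighbors in forward order, sharing the visited set.
import Mathlib
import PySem

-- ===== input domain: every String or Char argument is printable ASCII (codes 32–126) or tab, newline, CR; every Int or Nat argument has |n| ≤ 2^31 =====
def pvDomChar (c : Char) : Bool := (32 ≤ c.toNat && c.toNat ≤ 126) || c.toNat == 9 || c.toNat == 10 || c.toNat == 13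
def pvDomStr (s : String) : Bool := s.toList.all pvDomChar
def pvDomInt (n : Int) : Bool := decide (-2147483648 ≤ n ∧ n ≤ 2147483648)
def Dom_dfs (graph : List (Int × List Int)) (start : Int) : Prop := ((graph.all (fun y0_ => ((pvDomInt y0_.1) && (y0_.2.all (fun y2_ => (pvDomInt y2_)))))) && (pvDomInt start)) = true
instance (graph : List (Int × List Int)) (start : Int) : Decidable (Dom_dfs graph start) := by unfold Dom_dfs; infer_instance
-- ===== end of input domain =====

-- B replaces A's explicit-stack loop by an idiomatic recursive visit helper (forward neighbor order,
-- shared visited set); same preorder, same cost.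


-- helper used by dfsLoop's termination measure: number of graph keys not yet visited
def unvisitedCount (graph : List (Int × List Int)) (visited : List Int) : Nat :=
  ((graph.map Prod.fst).filter (fun x => decide (x ∉ visited))).length

-- termination lemma for dfsLoop: a key not in the graph's key list has no neighbors
theorem getD_nil_of_not_key (graph : List (Int × List Int)) (n : Int)
    (h : n ∉ graph.map Prod.fst) : PySem.Dict.getD (PySem.Dict.mk graph) n [] = [] := by
  induction graph with
  | nil => rfl
  | cons p rest ih =>
    simp only [List.map_cons, List.mem_cons, not_or] at h
    rw [PySem.Dict.getD_eq_get?_getD, PySem.Dict.get?_mk_cons,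
      if_neg (by simp only [beq_iff_eq]; exact fun he => h.1 he.symm), ← PySem.Dict.getD_eq_get?_getD]
    exact ih h.2

theorem length_filter_ne_lt {l : List Int} {a : Int} (h : a ∈ l) :
    (l.filter (fun x => decide (x ≠ a))).length < l.length := by
  induction l with
  | nil => cases h
  | cons b l ih =>
    by_cases hb : b = a
    · subst hb
      have hle := List.length_filter_le (fun x => decide (x ≠ b)) l
      simp only [ne_eq] at hle
      simp only [List.filter_cons, ne_eq, not_true_eq_false, decide_false,
        Bool.false_eq_true, if_false, List.length_cons]
      omega
    · rcases List.mem_cons.mp h with h' | h'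
      · exact absurd h'.symm hb
      · simp only [List.filter_cons, decide_eq_true_eq, if_pos hb, List.length_cons]
        exact Nat.succ_lt_succ (ih h')

-- termination lemma for dfsLoop: visiting an unvisited key strictly shrinks unvisitedCount
theorem unvisitedCount_add_lt {graph : List (Int × List Int)} {visited : List Int} {n : Int}
    (hk : n ∈ graph.map Prod.fst) (hv : n ∉ visited) :
    unvisitedCount graph (PySem.Set.add visited n) < unvisitedCount graph visited := by
  unfold unvisitedCount
  rw [PySem.Set.add_of_not_mem hv]
  have hcongr : (graph.map Prod.fst).filter (fun x => decide (x ∉ visited ++ [n]))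
      = ((graph.map Prod.fst).filter (fun x => decide (x ∉ visited))).filter (fun x => decide (x ≠ n)) := by
    rw [List.filter_filter]
    apply List.filter_congr
    intro x _
    by_cases h1 : x ∈ visited <;> by_cases h2 : x = n <;> simp [h1, h2]
  rw [hcongr]
  apply length_filter_ne_lt
  simp only [List.mem_filter, decide_eq_true_eq]
  exact ⟨hk, hv⟩

-- termination lemma for dfsLoop: visiting a non-key leaves unvisitedCount unchanged
theorem unvisitedCount_add_eq {graph : List (Int × List Int)} {visited : List Int} {n : Int}
    (hk : n ∉ graph.map Prod.fst) :
    unvisitedCount graph (PySem.Set.add visited n) = unvisitedCount graph visited := by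
  unfold unvisitedCount
  congr 1
  apply List.filter_congr
  intro x hx
  have hxn : x ≠ n := fun h => hk (h ▸ hx)
  by_cases h1 : x ∈ visited
  · simp [h1, PySem.Set.mem_add]
  · simp [h1, PySem.Set.mem_add, hxn]

-- ===== PORT A =====
-- A's while-loop; the stack is kept top-first (Python pushes/pops at the END, so
-- 'stack.pop()' = head here and 'stack.extend(reversed(nbrs))' = 'nbrs ++ rest').
def dfsLoop (graph : List (Int × List Int)) (visited : PySem.Set Int)
    (stack : List Int) (order : List Int) : List Int :=
  match stack with
  | [] => order
  | node :: rest =>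
    if node ∈ visited then
      dfsLoop graph visited rest order
    else
      dfsLoop graph (PySem.Set.add visited node)
        (PySem.Dict.getD (PySem.Dict.mk graph) node [] ++ rest) (order ++ [node])
termination_by (unvisitedCount graph visited, stack.length)
decreasing_by
  · exact Prod.Lex.right _ (by simp)
  · by_cases hk : node ∈ graph.map Prod.fst
    · exact Prod.Lex.left _ _ (unvisitedCount_add_lt hk (by assumption))
    · rw [getD_nil_of_not_key graph node hk, unvisitedCount_add_eq hk]
      exact Prod.Lex.right _ (by simp)

def dfs (graph : List (Int × List Int)) (start : Int) : List Int :=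
  dfsLoop graph PySem.Set.empty [start] []

-- ===== PORT B =====
-- B's recursive 'visit' applied to each node of a list in turn (the for-loop over neighbors);
-- 'fuel' only bounds the recursion depth and is never exhausted for the fuel dfs_alt supplies
-- (the proofs below never enter the fuel-0 branch).
def visitMany (graph : List (Int × List Int)) (fuel : Nat) (visited : PySem.Set Int)
    (order : List Int) (nodes : List Int) : PySem.Set Int × List Int :=
  match nodes with
  | [] => (visited, order)
  | n :: rest =>
    if n ∈ visited then
      visitMany graph fuel visited order rest
    else
      match fuel with
      | 0 => (visited, order)
      | f + 1 =>
        let p := visitMany graph f (PySem.Set.add visited n) (order ++ [n])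
          (PySem.Dict.getD (PySem.Dict.mk graph) n [])
        visitMany graph (f + 1) p.1 p.2 rest
termination_by (fuel, nodes.length)
decreasing_by
  · exact Prod.Lex.right _ (by simp)
  · exact Prod.Lex.left _ _ (by omega)
  · exact Prod.Lex.right _ (by simp)

def dfs_alt (graph : List (Int × List Int)) (start : Int) : List Int :=
  (visitMany graph (graph.length + 1) PySem.Set.empty [] [start]).2

-- ===== PRECONDITION & SPEC =====
def Spec_dfs (graph : List (Int × List Int)) (start : Int) (out : List Int) : Prop := out = dfs_alt graph start
instance (graph : List (Int × List Int)) (start : Int) (out : List Int) : Decidable (Spec_dfs graph start out) := by unfold Spec_dfs; infer_instance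

-- ===== CLAIM (what is proved, stated in full; the proofs are below) =====
def Claim_equal_dfs : Prop := ∀ (graph : List (Int × List Int)) (start : Int), Dom_dfs graph start → Spec_dfs graph start (dfs graph start)

-- ===== LEMMAS AND PROOFS =====

-- the visited set only grows through visitMany
theorem visitMany_mono (graph : List (Int × List Int)) (fuel : Nat) (visited : PySem.Set Int)
    (order : List Int) (nodes : List Int) {x : Int} (hx : x ∈ visited) :
    x ∈ (visitMany graph fuel visited order nodes).1 := by
  fun_induction visitMany graph fuel visited order nodes with
  | case1 => exact hx
  | case2 _ _ _ _ _ _ ih => exact ih hx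
  | case3 => exact hx
  | case4 v o n rest hmem f p ih1 ih2 =>
    exact ih2 (ih1 ((PySem.Set.mem_add _ _ _).mpr (Or.inl hx)))

theorem unvisitedCount_mono {graph : List (Int × List Int)} {v w : List Int}
    (h : ∀ x, x ∈ v → x ∈ w) : unvisitedCount graph w ≤ unvisitedCount graph v := by
  unfold unvisitedCount
  simp only [← List.countP_eq_length_filter]
  apply List.countP_mono_left
  intro a _
  simp only [decide_eq_true_eq]
  exact fun hw hv => hw (h a hv)

-- key bridge: running A's loop on 'ns ++ stack' first performs B's recursive visit of ns
theorem loop_eq_visit (graph : List (Int × List Int)) :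
    ∀ (fuel : Nat) (v : PySem.Set Int) (o ns stack : List Int),
    unvisitedCount graph v < fuel →
    dfsLoop graph v (ns ++ stack) o =
      dfsLoop graph (visitMany graph fuel v o ns).1 stack (visitMany graph fuel v o ns).2 := by
  intro fuel v o ns stack hfuel
  fun_induction visitMany graph fuel v o ns generalizing stack with
  | case1 => rfl
  | case2 fuel v o n rest hmem ih =>
    rw [List.cons_append, dfsLoop, if_pos hmem]
    exact ih stack hfuel
  | case3 v o n rest hmem =>
    omega
  | case4 v o n rest hmem f p ih1 ih2 =>
    rw [List.cons_append, dfsLoop, if_neg hmem]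
    by_cases hk : n ∈ graph.map Prod.fst
    · have h1 : unvisitedCount graph (PySem.Set.add v n) < f := by
        have := unvisitedCount_add_lt hk hmem; omega
      rw [ih1 (rest ++ stack) h1]
      have h2 : unvisitedCount graph p.1 < f + 1 := by
        show unvisitedCount graph (visitMany graph f (PySem.Set.add v n) (o ++ [n])
          (PySem.Dict.getD (PySem.Dict.mk graph) n [])).1 < f + 1
        have hsub := unvisitedCount_mono (graph := graph)
          (fun x hx => visitMany_mono graph f (PySem.Set.add v n) (o ++ [n])
            (PySem.Dict.getD (PySem.Dict.mk graph) n []) hx)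
        omega
      exact ih2 stack h2
    · have hnil : PySem.Dict.getD (PySem.Dict.mk graph) n [] = [] := getD_nil_of_not_key graph n hk
      have hp : p = (PySem.Set.add v n, o ++ [n]) := by
        show visitMany graph f (PySem.Set.add v n) (o ++ [n]) (PySem.Dict.getD (PySem.Dict.mk graph) n []) = _
        rw [hnil, visitMany]
      have h2 : unvisitedCount graph p.1 < f + 1 := by
        rw [hp]
        show unvisitedCount graph (PySem.Set.add v n) < f + 1
        have := unvisitedCount_add_eq (visited := v) hk; omega
      rw [hnil, List.nil_append]
      have := ih2 stack h2
      rw [hp] at this ⊢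
      exact this

-- ===== VERDICT (by name: the statement is the Claim_ definition above) =====
theorem dfs_spec : Claim_equal_dfs := by
  intro graph start _
  show dfs graph start = dfs_alt graph start
  unfold dfs dfs_alt
  have hfuel : unvisitedCount graph PySem.Set.empty < graph.length + 1 := by
    have h1 : unvisitedCount graph PySem.Set.empty ≤ (graph.map Prod.fst).length :=
      List.length_filter_le _ _
    simpa using Nat.lt_succ_of_le (by simpa using h1)
  have := loop_eq_visit graph (graph.length + 1) PySem.Set.empty [] [start] [] hfuel
  simpa [dfsLoop] using this
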